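-- pv_equiv track=rewrite | github.com/pkmnabcd/Antiderivative_web_project | _server/core/solving.py | findMatchingCurlys
-- ===== SOURCE A (Python) =====
-- def findMatchingCurlys(substring):
--     openCurlysList = []
--     closeCurlysList = []
--
--     currentIndex = 0
--     curlyCount = 0
--     while currentIndex < len(substring) - 1:
--         if substring[currentIndex : currentIndex + 2] == "{;":
--             if curlyCount == 0:
--                 openCurlysList.append(currentIndex)
--             curlyCount += 1
--             currentIndex += 2
--         elif substring[currentIndex : currentIndex + 2] == ";}":
--             curlyCount -= 1
--             if curlyCount == 0:
--                 closeCurlysList.append(currentIndex)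
--             currentIndex += 2
--         else:
--             currentIndex += 1
--
--     return openCurlysList, closeCurlysList
-- ===== SOURCE B (Python) =====
-- def findMatchingCurlys(substring):
--     opens = []
--     closes = []
--     count = 0
--     i = 0
--     while True:
--         o = substring.find("{;", i)
--         c = substring.find(";}", i)
--         if o == -1 and c == -1:
--             break
--         if c == -1 or (o != -1 and o < c):
--             if count == 0:
--                 opens.append(o)
--             count += 1
--             i = o + 2
--         else:
--             count -= 1
--             if count == 0:
--                 closes.append(c)
--             i = c + 2
--     return opens, closes
-- ===== Notes on version B (the rewrite author's own statement) =====
-- stated objective: faster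
-- what changed: B replaces A's character-by-character slice-comparison scan with repeated str.find jumps to the next open/close delimiter occurrence, keeping the same nesting counter, so the per-character Python-level loop disappears into C-level find.
import Mathlib
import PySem

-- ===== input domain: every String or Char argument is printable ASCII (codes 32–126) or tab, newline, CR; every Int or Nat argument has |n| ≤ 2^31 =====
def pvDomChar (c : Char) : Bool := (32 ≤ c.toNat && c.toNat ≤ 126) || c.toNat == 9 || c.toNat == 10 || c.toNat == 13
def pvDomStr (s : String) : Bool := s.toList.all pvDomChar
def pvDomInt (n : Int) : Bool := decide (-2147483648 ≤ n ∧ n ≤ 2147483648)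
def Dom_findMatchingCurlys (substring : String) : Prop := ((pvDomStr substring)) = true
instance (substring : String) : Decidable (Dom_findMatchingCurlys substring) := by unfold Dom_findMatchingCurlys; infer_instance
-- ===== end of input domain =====

-- B replaces A's character-by-character scan by jumping straight to the next
-- occurrence of "{;" or ";}" with str.find, keeping the same nesting counter
-- (objective: alternative / constant-factor faster on delimiter-sparse input).

-- ===== PORT A =====
-- Python's `while currentIndex < len(substring) - 1` on ints is `i + 1 < len` for i : Nat.
def pvLoopA (cs : List Char) (opens closes : List Int) (i : Nat) (count : Int) :
    List Int × List Int :=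
  if _h : i + 1 < cs.length then
    if PySem.List.slice cs (some (i : Int)) (some ((i : Int) + 2)) = ['{', ';'] then
      pvLoopA cs (if count = 0 then opens ++ [(i : Int)] else opens) closes (i + 2) (count + 1)
    else if PySem.List.slice cs (some (i : Int)) (some ((i : Int) + 2)) = [';', '}'] then
      pvLoopA cs opens (if count - 1 = 0 then closes ++ [(i : Int)] else closes) (i + 2)
        (count - 1)
    else
      pvLoopA cs opens closes (i + 1) count
  else (opens, closes)
termination_by cs.length - i

def findMatchingCurlys (substring : String) : List Int × List Int :=
  pvLoopA substring.toList [] [] 0 0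

-- ===== PORT B =====
-- Termination helpers for port B (cited by name in decreasing_by).
theorem pvFindFrom_past (s sub : List Char) (i : Nat) (h : s.length < i) :
    PySem.Chars.findFrom s sub (i : Int) = -1 := by
  simp only [PySem.Chars.findFrom]
  have h1 : ¬ ((i : Int) < 0) := by omega
  have h2 : (s.length : Int) < (i : Int) := by exact_mod_cast h
  simp [h1, h2]

theorem pvFindFrom_bound (cs sub : List Char) (hsub : sub.length = 2) (i : Nat)
    (h : PySem.Chars.findFrom cs sub (i : Int) ≠ -1) :
    i ≤ (PySem.Chars.findFrom cs sub (i : Int)).toNat ∧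
      (PySem.Chars.findFrom cs sub (i : Int)).toNat + 2 ≤ cs.length := by
  rcases le_or_gt i cs.length with hk | hk
  · obtain ⟨h1, h2, _⟩ := PySem.Chars.findFrom_natCast_spec cs sub i hk h
    have h3 := h2.length_le
    have h4 : (List.drop (PySem.Chars.findFrom cs sub (i : Int)).toNat cs).length
        = cs.length - (PySem.Chars.findFrom cs sub (i : Int)).toNat := List.length_drop ..
    constructor
    · omega
    · rw [h4] at h3; omega
  · exact absurd (pvFindFrom_past cs sub i hk) h

-- B: repeatedly jump to the next delimiter occurrence via str.find (PySem.Chars.findFrom).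
def pvLoopB (cs : List Char) (opens closes : List Int) (i : Nat) (count : Int) :
    List Int × List Int :=
  let o := PySem.Chars.findFrom cs ['{', ';'] (i : Int)
  let c := PySem.Chars.findFrom cs [';', '}'] (i : Int)
  if h1 : o = -1 ∧ c = -1 then (opens, closes)
  else if h2 : c = -1 ∨ (o ≠ -1 ∧ o < c) then
    pvLoopB cs (if count = 0 then opens ++ [o] else opens) closes (o.toNat + 2) (count + 1)
  else
    pvLoopB cs opens (if count - 1 = 0 then closes ++ [c] else closes) (c.toNat + 2)
      (count - 1)
termination_by cs.length + 1 - i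
decreasing_by
  · have ho : PySem.Chars.findFrom cs ['{', ';'] (i : Int) ≠ -1 := by tauto
    have := pvFindFrom_bound cs ['{', ';'] rfl i ho
    rcases le_or_gt i cs.length with hk | hk
    · omega
    · exact absurd (pvFindFrom_past cs ['{', ';'] i hk) ho
  · have hc : PySem.Chars.findFrom cs [';', '}'] (i : Int) ≠ -1 := by tauto
    have := pvFindFrom_bound cs [';', '}'] rfl i hc
    rcases le_or_gt i cs.length with hk | hk
    · omega
    · exact absurd (pvFindFrom_past cs [';', '}'] i hk) hc

def findMatchingCurlys_alt (substring : String) : List Int × List Int :=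
  pvLoopB substring.toList [] [] 0 0

-- ===== PRECONDITION & SPEC =====
def Spec_findMatchingCurlys (substring : String) (out : List Int × List Int) : Prop := out = findMatchingCurlys_alt substring
instance (substring : String) (out : List Int × List Int) : Decidable (Spec_findMatchingCurlys substring out) := by unfold Spec_findMatchingCurlys; infer_instance

-- ===== CLAIM (what is proved, stated in full; the proofs are below) =====
def Claim_equal_findMatchingCurlys : Prop := ∀ (substring : String), Dom_findMatchingCurlys substring → Spec_findMatchingCurlys substring (findMatchingCurlys substring)

-- ===== LEMMAS AND PROOFS =====


theorem pv_slice_eq_iff (cs sub : List Char) (i : Nat) (hsub : sub.length = 2) :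
    (PySem.List.slice cs (some (i : Int)) (some ((i : Int) + 2)) = sub) ↔ sub <+: cs.drop i := by
  have h2 : ((i : Int) + 2) = ((i : Int) + ((2 : Nat) : Int)) := by norm_num
  rw [h2, PySem.List.slice_natCast_add]
  constructor
  · intro h; rw [← h]; exact List.take_prefix _ _
  · intro h; rw [List.prefix_iff_eq_take] at h; rw [hsub] at h; exact h.symm

theorem pv_findFrom_at (cs sub : List Char) (i : Nat) (h0 : sub ≠ [])
    (hpre : sub <+: cs.drop i) :
    PySem.Chars.findFrom cs sub (i : Int) = (i : Int) := by
  have hk : i ≤ cs.length := by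
    by_contra hgt
    have : cs.drop i = [] := List.drop_eq_nil_of_le (by omega)
    rw [this] at hpre
    exact h0 (List.prefix_nil.mp hpre)
  rw [PySem.Chars.findFrom_natCast cs sub i hk]
  have hinf : sub <:+: cs.drop i := hpre.isInfix
  have hnn : 0 ≤ PySem.Chars.find (cs.drop i) sub := (PySem.Chars.find_nonneg_iff _ _).mpr hinf
  obtain ⟨hp, hmin⟩ := PySem.Chars.find_spec hnn
  have hz : (PySem.Chars.find (cs.drop i) sub).toNat = 0 := by
    by_contra hne
    exact hmin 0 (by omega) (by simpa using hpre)
  have : PySem.Chars.find (cs.drop i) sub = 0 := by omega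
  rw [this]; simp

theorem pv_findFrom_none_end (cs sub : List Char) (i : Nat) (hi : i ≤ cs.length)
    (hend : cs.length ≤ i + 1) (h2 : 2 ≤ sub.length) :
    PySem.Chars.findFrom cs sub (i : Int) = -1 := by
  rw [PySem.Chars.findFrom_natCast_eq_neg_one_iff cs sub i hi]
  intro hinf
  have := hinf.length_le
  rw [List.length_drop] at this
  omega

theorem pv_findFrom_succ (cs sub : List Char) (i : Nat) (hi : i + 1 ≤ cs.length)
    (hnot : ¬ sub <+: cs.drop i) :
    PySem.Chars.findFrom cs sub (i : Int) = PySem.Chars.findFrom cs sub ((i + 1 : Nat) : Int) := by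
  have hdd : cs.drop (i + 1) = (cs.drop i).drop 1 := by rw [List.drop_drop]
  by_cases hm1 : PySem.Chars.findFrom cs sub (i : Int) = -1
  · rw [hm1]
    rw [PySem.Chars.findFrom_natCast_eq_neg_one_iff cs sub i (by omega)] at hm1
    rw [eq_comm]
    rw [PySem.Chars.findFrom_natCast_eq_neg_one_iff cs sub (i+1) hi]
    intro hinf
    exact hm1 (hinf.trans (by rw [hdd]; exact (List.drop_suffix _ _).isInfix))
  · obtain ⟨hle, hp, hmin⟩ := PySem.Chars.findFrom_natCast_spec cs sub i (by omega) hm1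
    set r := PySem.Chars.findFrom cs sub (i : Int) with hr
    have hri : r.toNat ≠ i := by
      intro he; rw [he] at hp; exact hnot hp
    have hlt : i + 1 ≤ r.toNat := by omega
    have hm1' : PySem.Chars.findFrom cs sub ((i + 1 : Nat) : Int) ≠ -1 := by
      rw [Ne, PySem.Chars.findFrom_natCast_eq_neg_one_iff cs sub (i+1) hi]
      push Not
      refine (hp.isInfix).trans ?_
      have : cs.drop r.toNat = (cs.drop (i+1)).drop (r.toNat - (i+1)) := by
        rw [List.drop_drop]; congr 1; omega
      rw [this]; exact (List.drop_suffix _ _).isInfix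
    obtain ⟨hle', hp', hmin'⟩ := PySem.Chars.findFrom_natCast_spec cs sub (i+1) hi hm1'
    set r' := PySem.Chars.findFrom cs sub ((i + 1 : Nat) : Int) with hr'
    have e1 : ¬ (r'.toNat < r.toNat) := fun hc => hmin r'.toNat (by omega) hc hp'
    have e2 : ¬ (r.toNat < r'.toNat) := fun hc => hmin' r.toNat (by omega) hc hp
    omega

theorem pvLoopB_eq (cs : List Char) (opens closes : List Int) (i : Nat) (count : Int) :
    pvLoopB cs opens closes i count =
      (if PySem.Chars.findFrom cs ['{', ';'] (i : Int) = -1 ∧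
            PySem.Chars.findFrom cs [';', '}'] (i : Int) = -1 then (opens, closes)
       else if PySem.Chars.findFrom cs [';', '}'] (i : Int) = -1 ∨
            (PySem.Chars.findFrom cs ['{', ';'] (i : Int) ≠ -1 ∧
              PySem.Chars.findFrom cs ['{', ';'] (i : Int) <
                PySem.Chars.findFrom cs [';', '}'] (i : Int)) then
         pvLoopB cs
           (if count = 0 then opens ++ [PySem.Chars.findFrom cs ['{', ';'] (i : Int)] else opens)
           closes ((PySem.Chars.findFrom cs ['{', ';'] (i : Int)).toNat + 2) (count + 1)
       else
         pvLoopB cs opens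
           (if count - 1 = 0 then closes ++ [PySem.Chars.findFrom cs [';', '}'] (i : Int)]
            else closes)
           ((PySem.Chars.findFrom cs [';', '}'] (i : Int)).toNat + 2) (count - 1)) := by
  rw [pvLoopB.eq_def]
  rfl

theorem pv_terminal (cs : List Char) (opens closes : List Int) (i : Nat) (count : Int)
    (hi : i ≤ cs.length) (hterm : ¬ (i + 1 < cs.length)) :
    pvLoopA cs opens closes i count = pvLoopB cs opens closes i count := by
  have ho := pv_findFrom_none_end cs ['{', ';'] i hi (by omega) (by simp)
  have hc := pv_findFrom_none_end cs [';', '}'] i hi (by omega) (by simp)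
  rw [pvLoopA.eq_def, pvLoopB_eq, ho, hc]
  simp [hterm]

theorem pv_both_prefix_absurd (cs : List Char) (i : Nat)
    (h1 : ['{', ';'] <+: cs.drop i) (h2 : [';', '}'] <+: cs.drop i) : False := by
  rw [List.prefix_iff_eq_take] at h1 h2
  simp only [List.length_cons, List.length_nil] at h1 h2
  have := h1.trans h2.symm
  simp at this

theorem pv_loop_eq_aux (cs : List Char) (n : Nat) :
    ∀ (i : Nat), i ≤ cs.length → cs.length - i ≤ n → ∀ (opens closes : List Int) (count : Int),
      pvLoopA cs opens closes i count = pvLoopB cs opens closes i count := by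
  induction n with
  | zero =>
    intro i hi hn opens closes count
    exact pv_terminal cs opens closes i count hi (by omega)
  | succ n ih =>
    intro i hi hn opens closes count
    by_cases hterm : i + 1 < cs.length
    · by_cases hopen : PySem.List.slice cs (some (i : Int)) (some ((i : Int) + 2)) = ['{', ';']
      · -- "{;" at position i
        have hpre : ['{', ';'] <+: cs.drop i := (pv_slice_eq_iff cs _ i rfl).mp hopen
        have ho : PySem.Chars.findFrom cs ['{', ';'] (i : Int) = (i : Int) :=
          pv_findFrom_at cs _ i (by simp) hpre
        have hi2 : i + 2 ≤ cs.length := by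
          have := hpre.length_le
          rw [List.length_drop] at this
          simp at this
          omega
        have hcnd : PySem.Chars.findFrom cs [';', '}'] (i : Int) = -1 ∨
            ((i : Int) ≠ -1 ∧ (i : Int) < PySem.Chars.findFrom cs [';', '}'] (i : Int)) := by
          by_cases hc1 : PySem.Chars.findFrom cs [';', '}'] (i : Int) = -1
          · exact Or.inl hc1
          · obtain ⟨hle, hp, _⟩ :=
              PySem.Chars.findFrom_natCast_spec cs [';', '}'] i hi hc1
            refine Or.inr ⟨by omega, ?_⟩
            have hne : (PySem.Chars.findFrom cs [';', '}'] (i : Int)).toNat ≠ i := by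
              intro he
              rw [he] at hp
              exact pv_both_prefix_absurd cs i hpre hp
            omega
        have hne1 : ¬((i : Int) = -1 ∧ PySem.Chars.findFrom cs [';', '}'] (i : Int) = -1) := by
          rintro ⟨h', _⟩; omega
        rw [pvLoopA.eq_def, pvLoopB_eq, ho]
        rw [dif_pos hterm, if_pos hopen, if_neg hne1, if_pos hcnd]
        simp only [Int.toNat_natCast]
        exact ih (i + 2) hi2 (by omega) _ _ _
      · by_cases hclose : PySem.List.slice cs (some (i : Int)) (some ((i : Int) + 2)) = [';', '}']
        · -- ";}" at position i
          have hpre : [';', '}'] <+: cs.drop i := (pv_slice_eq_iff cs _ i rfl).mp hclose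
          have hnpre : ¬ ['{', ';'] <+: cs.drop i := by
            rw [← pv_slice_eq_iff cs _ i rfl]
            exact hopen
          have hc : PySem.Chars.findFrom cs [';', '}'] (i : Int) = (i : Int) :=
            pv_findFrom_at cs _ i (by simp) hpre
          have hi2 : i + 2 ≤ cs.length := by
            have := hpre.length_le
            rw [List.length_drop] at this
            simp at this
            omega
          have hncnd : ¬ ((i : Int) = -1 ∨
              (PySem.Chars.findFrom cs ['{', ';'] (i : Int) ≠ -1 ∧
                PySem.Chars.findFrom cs ['{', ';'] (i : Int) < (i : Int))) := by
            rintro (h | ⟨hone, hlt⟩)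
            · omega
            · obtain ⟨hle, hp, _⟩ :=
                PySem.Chars.findFrom_natCast_spec cs ['{', ';'] i hi hone
              have hne : (PySem.Chars.findFrom cs ['{', ';'] (i : Int)).toNat ≠ i := by
                intro he
                rw [he] at hp
                exact pv_both_prefix_absurd cs i hp hpre
              omega
          have hne1 : ¬(PySem.Chars.findFrom cs ['{', ';'] (i : Int) = -1 ∧ (i : Int) = -1) := by
            rintro ⟨_, h'⟩; omega
          rw [pvLoopA.eq_def, pvLoopB_eq, hc]
          rw [dif_pos hterm, if_neg hopen, if_pos hclose, if_neg hne1, if_neg hncnd]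
          simp only [Int.toNat_natCast]
          exact ih (i + 2) hi2 (by omega) _ _ _
        · -- no delimiter at position i: B's finds are unchanged when moving to i + 1
          have hno : ¬ ['{', ';'] <+: cs.drop i := by
            rw [← pv_slice_eq_iff cs _ i rfl]; exact hopen
          have hnc : ¬ [';', '}'] <+: cs.drop i := by
            rw [← pv_slice_eq_iff cs _ i rfl]; exact hclose
          have hstep : pvLoopB cs opens closes i count = pvLoopB cs opens closes (i + 1) count := by
            rw [pvLoopB_eq,
              pv_findFrom_succ cs ['{', ';'] i (by omega) hno,
              pv_findFrom_succ cs [';', '}'] i (by omega) hnc,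
              ← pvLoopB_eq]
          rw [pvLoopA.eq_def, dif_pos hterm, if_neg hopen, if_neg hclose, hstep]
          exact ih (i + 1) (by omega) (by omega) _ _ _
    · exact pv_terminal cs opens closes i count hi hterm

theorem pv_loop_eq (cs : List Char) (i : Nat) (hi : i ≤ cs.length)
    (opens closes : List Int) (count : Int) :
    pvLoopA cs opens closes i count = pvLoopB cs opens closes i count :=
  pv_loop_eq_aux cs (cs.length - i) i hi le_rfl opens closes count


-- ===== VERDICT (by name: the statement is the Claim_ definition above) =====
theorem findMatchingCurlys_spec : Claim_equal_findMatchingCurlys := by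
  intro s _
  unfold Spec_findMatchingCurlys findMatchingCurlys findMatchingCurlys_alt
  exact pv_loop_eq s.toList 0 (Nat.zero_le _) [] [] 0
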